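-- pv_equiv track=rewrite | github.com/MrBrantCode/unitest_baseline | mut_generate/mist_train_cf/cf_88075/solution.py | retrieve_last_three_unique_elements
-- ===== SOURCE A (Python) =====
-- def retrieve_last_three_unique_elements(arr):
--     if len(arr) < 3:
--         return arr
--     unique_elements = []
--     for i in range(len(arr)-1, -1, -1):
--         if arr[i] not in unique_elements:
--             unique_elements.append(arr[i])
--             if len(unique_elements) == 3:
--                 break
--     return sorted(unique_elements)
-- ===== SOURCE B (Python) =====
-- def retrieve_last_three_unique_elements(arr):
--     if len(arr) < 3:
--         return arr
--     # one forward pass: map each value to the index of its LAST occurrence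
--     last = {}
--     for i, x in enumerate(arr):
--         last[x] = i
--     # the three distinct values with the largest last-occurrence indices
--     picked = sorted(last, key=last.get, reverse=True)[:3]
--     return sorted(picked)
-- ===== Notes on version B (the rewrite author's own statement) =====
-- stated objective: alternative
-- what changed: Replaces the backward index scan with membership test and early break by a forward pass building a value-to-last-index table, then selecting the three keys with the largest stored indices by sorting the keys on that index in descending order.
import Mathlib
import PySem

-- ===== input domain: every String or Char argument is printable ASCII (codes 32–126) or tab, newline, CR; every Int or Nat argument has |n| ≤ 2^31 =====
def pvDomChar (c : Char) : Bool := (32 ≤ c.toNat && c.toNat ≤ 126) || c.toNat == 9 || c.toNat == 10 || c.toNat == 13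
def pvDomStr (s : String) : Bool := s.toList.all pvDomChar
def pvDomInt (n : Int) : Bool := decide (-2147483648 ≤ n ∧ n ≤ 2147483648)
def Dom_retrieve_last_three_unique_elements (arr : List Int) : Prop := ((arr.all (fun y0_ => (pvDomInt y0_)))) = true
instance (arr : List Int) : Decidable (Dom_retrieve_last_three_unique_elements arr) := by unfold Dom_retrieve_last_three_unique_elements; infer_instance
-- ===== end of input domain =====

-- B replaces A's backward index scan (membership test + break at 3) by a forward pass building a
-- value -> last-occurrence-index table, then sorting the table's keys by that index descending and
-- taking the first three; objective: alternative decomposition, not faster.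

-- ===== PORT A =====
-- the for-loop over range(len(arr)-1, -1, -1) with its break; indices produced by pyRange are in
-- range, so arr[i] is pyGetD (exact there)
def pvLoopA (arr : List Int) : List Int → List Int → List Int
  | [], acc => acc
  | i :: rest, acc =>
    if PySem.List.pyGetD arr i 0 ∈ acc then
      pvLoopA arr rest acc
    else
      let acc' := acc ++ [PySem.List.pyGetD arr i 0]
      if acc'.length = 3 then acc' else pvLoopA arr rest acc'

def retrieve_last_three_unique_elements (arr : List Int) : List Int :=
  if PySem.List.len arr < 3 then arr
  else
    PySem.List.sorted
      (pvLoopA arr (PySem.List.pyRange (PySem.List.len arr - 1) (-1) (-1)) [])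
      (fun x => x) false

-- ===== PORT B =====
-- the 'for i, x in enumerate(arr): last[x] = i' loop
def pvLastIdx (arr : List Int) : PySem.Dict Int Int :=
  (PySem.List.enumerate arr 0).foldl (fun d p => d.insert p.2 p.1) PySem.Dict.empty

def retrieve_last_three_unique_elements_alt (arr : List Int) : List Int :=
  if PySem.List.len arr < 3 then arr
  else
    let last := pvLastIdx arr
    -- sorted(last, key=last.get, reverse=True)[:3]; every iterated k is a key of last,
    -- so last.get k is its stored index: getD with any default is exact there
    let picked := PySem.List.slice
      (PySem.List.sorted last.keys (fun k => last.getD k 0) true) none (some 3)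
    PySem.List.sorted picked (fun x => x) false

-- ===== PRECONDITION & SPEC =====
def Spec_retrieve_last_three_unique_elements (arr : List Int) (out : List Int) : Prop := out = retrieve_last_three_unique_elements_alt arr
instance (arr : List Int) (out : List Int) : Decidable (Spec_retrieve_last_three_unique_elements arr out) := by unfold Spec_retrieve_last_three_unique_elements; infer_instance

-- ===== CLAIM (what is proved, stated in full; the proofs are below) =====
def Claim_equal_retrieve_last_three_unique_elements : Prop := ∀ (arr : List Int), Dom_retrieve_last_three_unique_elements arr → Spec_retrieve_last_three_unique_elements arr (retrieve_last_three_unique_elements arr)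

-- ===== LEMMAS AND PROOFS =====

-- ---- A side: the backward loop collects the first three distinct values of arr.reverse ----

-- A's loop expressed over the sequence of VALUES it visits
def pvValLoop : List Int → List Int → List Int
  | [], acc => acc
  | x :: rest, acc =>
    if x ∈ acc then pvValLoop rest acc
    else
      let acc' := acc ++ [x]
      if acc'.length = 3 then acc' else pvValLoop rest acc'

lemma pvLoopA_eq_valLoop (arr : List Int) (js : List Nat)
    (hjs : ∀ j ∈ js, j < arr.length) (acc : List Int) :
    pvLoopA arr (js.map (fun j : Nat => (j : Int))) acc
      = pvValLoop (js.map (fun j => arr.getD j 0)) acc := by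
  induction js generalizing acc with
  | nil => rfl
  | cons j js ih =>
    have hj : j < arr.length := hjs j (by simp)
    have hrest : ∀ j ∈ js, j < arr.length := fun k hk => hjs k (by simp [hk])
    have hget : PySem.List.pyGetD arr ((j : Nat) : Int) 0 = arr.getD j 0 :=
      PySem.List.pyGetD_natCast arr j 0
    simp only [List.map_cons, pvLoopA, pvValLoop, hget]
    split_ifs with h1 h2
    · exact ih hrest _
    · rfl
    · exact ih hrest _

lemma pvValLoop_eq_update (r : List Int) : ∀ acc : List Int, acc.length < 3 →
    pvValLoop r acc = (PySem.Set.update acc r).take 3 := by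
  induction r with
  | nil =>
    intro acc h
    simp [pvValLoop, PySem.Set.update_nil, List.take_of_length_le (by omega : acc.length ≤ 3)]
  | cons x r ih =>
    intro acc h
    rw [pvValLoop, PySem.Set.update_cons]
    by_cases hx : x ∈ acc
    · rw [if_pos hx, PySem.Set.add_of_mem hx]
      exact ih acc h
    · rw [if_neg hx, PySem.Set.add_of_not_mem hx]
      by_cases h3 : (acc ++ [x]).length = 3
      · rw [if_pos h3]
        rw [PySem.Set.update_eq_append_filter,
          List.take_append_of_le_length (by omega : 3 ≤ (acc ++ [x]).length),
          List.take_of_length_le (by omega : (acc ++ [x]).length ≤ 3)]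
      · rw [if_neg h3]
        exact ih (acc ++ [x]) (by simp at h3 ⊢; omega)

lemma pvRange_down (n : Nat) :
    PySem.List.pyRange ((n : Int) - 1) (-1) (-1)
      = (List.range n).map (fun k => ((n - 1 - k : Nat) : Int)) := by
  rw [PySem.List.pyRange_neg_one]
  have : ((n : Int) - 1 - (-1)).toNat = n := by omega
  rw [this]
  apply List.map_congr_left
  intro k hk
  rw [List.mem_range] at hk
  omega

lemma pvMap_getD_rev (arr : List Int) :
    (List.range arr.length).map (fun k => arr.getD (arr.length - 1 - k) 0)
      = arr.reverse := by
  apply List.ext_getElem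
  · simp
  · intro i h1 h2
    simp only [List.getElem_map, List.getElem_range, List.getElem_reverse]
    rw [List.getD_eq_getElem _ _ (by simp at h1 ⊢; omega)]

lemma pvLoopA_result (arr : List Int) :
    pvLoopA arr (PySem.List.pyRange ((arr.length : Int) - 1) (-1) (-1)) []
      = (PySem.Set.ofList arr.reverse).take 3 := by
  have hsplit : (List.range arr.length).map (fun k => ((arr.length - 1 - k : Nat) : Int))
      = ((List.range arr.length).map (fun k => arr.length - 1 - k)).map (fun j : Nat => (j : Int)) := by
    rw [List.map_map]; rfl
  rw [pvRange_down arr.length, hsplit,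
    pvLoopA_eq_valLoop arr _ (by intro j hj; simp at hj; obtain ⟨k, hk, rfl⟩ := hj; omega),
    List.map_map]
  rw [show ((fun j => arr.getD j 0) ∘ fun k => arr.length - 1 - k)
      = fun k => arr.getD (arr.length - 1 - k) 0 from rfl, pvMap_getD_rev,
    pvValLoop_eq_update arr.reverse [] (by simp), PySem.Set.update_nil_left]

-- ---- B side: the last-index table sorted by index descending is dedup of arr.reverse ----

lemma pvLastIdx_keys (arr : List Int) :
    (pvLastIdx arr).keys = PySem.Set.ofList arr := by
  unfold pvLastIdx
  rw [PySem.Dict.keys_foldl_insert_key (PySem.List.enumerate arr 0) (fun p => p.2)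
      (fun _ p => p.1) PySem.Dict.empty,
    PySem.Dict.keys_empty, PySem.List.map_snd_enumerate, PySem.Set.update_nil_left]

lemma pvFold_get? (l : List (Int × Int)) (d : PySem.Dict Int Int) (v : Int) :
    (l.foldl (fun d p => d.insert p.2 p.1) d).get? v
      = ((l.reverse.find? (fun p => p.2 == v)).map (·.1)).or (d.get? v) := by
  induction l using List.reverseRecOn generalizing d with
  | nil => simp
  | append_singleton l p ih =>
    rw [List.foldl_append, List.foldl_cons, List.foldl_nil, List.reverse_append]
    simp only [List.reverse_cons, List.reverse_nil, List.nil_append, List.cons_append,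
      List.find?_cons, PySem.Dict.get?_insert]
    by_cases hv : p.2 = v
    · subst hv; simp
    · have hne : (p.2 == v) = false := by simp [hv]
      have hv' : v ≠ p.2 := fun h => hv h.symm
      simp [hne, hv', ih]

lemma pvFind_enum_rev (arr : List Int) (v : Int) (hv : v ∈ arr) :
    ((PySem.List.enumerate arr 0).reverse.find? (fun p => p.2 == v)).map (·.1)
      = some ((arr.length : Int) - 1 - (arr.reverse.idxOf v : Nat)) := by
  induction arr using List.reverseRecOn with
  | nil => simp at hv
  | append_singleton t x ih =>
    rw [PySem.List.enumerate_append, PySem.List.enumerate_cons, PySem.List.enumerate_nil,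
      List.reverse_append]
    simp only [List.reverse_cons, List.reverse_nil, List.nil_append, List.cons_append,
      List.find?_cons, List.reverse_append, List.length_append, List.length_cons,
      List.length_nil, List.reverse_nil, List.reverse_cons, List.nil_append]
    by_cases hx : x = v
    · subst hx
      simp only [beq_self_eq_true]
      rw [List.idxOf_cons_self]
      simp only [Option.map_some]
      congr 1
      push_cast
      ring
    · have hne : (x == v) = false := by simp [hx]
      have hvt : v ∈ t := by
        rcases List.mem_append.mp hv with h | h
        · exact h
        · simp at h; exact absurd h.symm hx
      rw [hne]
      simp only []
      rw [ih hvt, List.idxOf_cons_ne _ hx]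
      congr 1
      push_cast
      ring

lemma pvKey_eq (arr : List Int) (v : Int) (hv : v ∈ arr) :
    (pvLastIdx arr).getD v 0 = (arr.length : Int) - 1 - (arr.reverse.idxOf v : Nat) := by
  rw [PySem.Dict.getD_eq_get?_getD]
  unfold pvLastIdx
  rw [pvFold_get?, pvFind_enum_rev arr v hv, PySem.Dict.get?_empty]
  rfl

-- dedup keeps first occurrences in order, so idxOf is strictly increasing along it
lemma pvPairwise_idxOf (r : List Int) :
    (PySem.Set.ofList r).Pairwise (fun a b => r.idxOf a < r.idxOf b) := by
  induction r with
  | nil => simp [PySem.Set.ofList_nil]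
  | cons x t ih =>
    rw [PySem.Set.ofList_cons]
    constructor
    · intro b hb
      have hbx : b ≠ x := ((PySem.Set.mem_discard _ _ _).mp hb).2
      rw [List.idxOf_cons_self, List.idxOf_cons_ne _ (fun h => hbx h.symm)]
      exact Nat.succ_pos _
    · have hsub : List.Sublist ((PySem.Set.ofList t).discard x) (PySem.Set.ofList t) := by
        simp [PySem.Set.discard]
      refine ((ih.sublist hsub).imp_of_mem ?_)
      intro a b ha hb hab
      have hax : a ≠ x := ((PySem.Set.mem_discard _ _ _).mp ha).2
      have hbx : b ≠ x := ((PySem.Set.mem_discard _ _ _).mp hb).2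
      rw [List.idxOf_cons_ne _ (fun h => hax h.symm),
        List.idxOf_cons_ne _ (fun h => hbx h.symm)]
      exact Nat.succ_lt_succ hab

lemma pvSorted_keys (arr : List Int) :
    PySem.List.sorted (pvLastIdx arr).keys (fun k => (pvLastIdx arr).getD k 0) true
      = PySem.Set.ofList arr.reverse := by
  apply PySem.List.sorted_rev_eq_of_perm_of_pairwise_gt
  · rw [pvLastIdx_keys]
    refine (List.perm_ext_iff_of_nodup (PySem.Set.nodup_ofList _) (PySem.Set.nodup_ofList _)).mpr ?_
    intro a
    rw [PySem.Set.mem_ofList, PySem.Set.mem_ofList, List.mem_reverse]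
  · refine (pvPairwise_idxOf arr.reverse).imp_of_mem ?_
    intro a b ha hb hab
    have ha' : a ∈ arr := List.mem_reverse.mp ((PySem.Set.mem_ofList _ _).mp ha)
    have hb' : b ∈ arr := List.mem_reverse.mp ((PySem.Set.mem_ofList _ _).mp hb)
    rw [pvKey_eq arr a ha', pvKey_eq arr b hb']
    omega

-- ===== VERDICT (by name: the statement is the Claim_ definition above) =====
theorem retrieve_last_three_unique_elements_spec : Claim_equal_retrieve_last_three_unique_elements := by
  intro arr _
  unfold Spec_retrieve_last_three_unique_elements
  unfold retrieve_last_three_unique_elements retrieve_last_three_unique_elements_alt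
  by_cases h : PySem.List.len arr < 3
  · rw [if_pos h, if_pos h]
  · rw [if_neg h, if_neg h]
    simp only [PySem.List.len_eq] at *
    congr 1
    rw [pvLoopA_result, pvSorted_keys,
      PySem.List.slice_to (PySem.Set.ofList arr.reverse) (by omega : (0:Int) ≤ 3)]
    rfl
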